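-- pv_equiv track=rewrite | github.com/argilo/advent | 2016/09.py | decompress_len1
-- ===== SOURCE A (Python) =====
-- def decompress_len1(s):
--     output_len = 0
--     offset = 0
--     while offset < len(s):
--         if s[offset] == "(":
--             offset += 1
--             marker = ""
--             while s[offset] != ")":
--                 marker += s[offset]
--                 offset += 1
--             offset += 1
--             parts = marker.split("x")
--             chars, repeat = int(parts[0]), int(parts[1])
--             output_len += chars * repeat
--             offset += chars
--         else:
--             output_len += 1
--             offset += 1
--     return(output_len)
-- ===== SOURCE B (Python) =====
-- def decompress_len1(s):
--     output_len = 0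
--     offset = 0
--     n = len(s)
--     while offset < n:
--         if s[offset] == "(":
--             close = s.index(")", offset + 1)
--             parts = s[offset + 1:close].split("x")
--             chars, repeat = int(parts[0]), int(parts[1])
--             output_len += chars * repeat
--             offset = close + 1 + chars
--         else:
--             nxt = s.find("(", offset)
--             if nxt == -1:
--                 nxt = n
--             output_len += nxt - offset
--             offset = nxt
--     return output_len
-- ===== Notes on version B (the rewrite author's own statement) =====
-- stated objective: faster
-- what changed: B replaces A's per-character literal counting by one bulk step per literal span (jump to the next '(' via find) and parses each marker by index-of-')' plus a slice instead of char-by-char string accumulation, so the Python-level loop runs once per span/marker instead of once per character.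
-- outside the precondition, e.g. on decompress_len1('(-1x0)'): A returns 1, B returns 1
import Mathlib
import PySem

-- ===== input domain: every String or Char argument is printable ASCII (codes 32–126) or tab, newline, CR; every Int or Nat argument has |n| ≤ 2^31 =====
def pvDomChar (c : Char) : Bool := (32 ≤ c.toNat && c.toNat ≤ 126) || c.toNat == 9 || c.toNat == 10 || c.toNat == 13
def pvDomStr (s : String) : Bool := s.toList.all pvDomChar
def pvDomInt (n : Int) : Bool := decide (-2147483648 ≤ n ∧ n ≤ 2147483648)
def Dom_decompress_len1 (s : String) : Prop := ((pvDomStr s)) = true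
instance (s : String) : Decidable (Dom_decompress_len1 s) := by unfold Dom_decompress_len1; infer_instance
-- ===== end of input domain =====

-- B replaces A's per-character literal counting by bulk span jumps to the next '(' (via find)
-- and parses each marker by index-of-')' plus a slice instead of char-by-char accumulation;
-- objective: faster by constant factor on literal-heavy input. Return-value equivalence only.

-- ===== PORT A =====
-- inner while loop of A: accumulate marker chars until ')'; none = IndexError (fuel only guards totality)
def aScan (l : List Char) (marker : List Char) (offset : Int) (fuel : Nat) : Option (List Char × Int) :=
  match fuel with
  | 0 => none
  | fuel + 1 =>
    match PySem.List.pyGet? l offset with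
    | none => none
    | some c => if c = ')' then some (marker, offset) else aScan l (marker ++ [c]) (offset + 1) fuel

-- outer while loop of A (fuel = len s + 1 suffices on the precondition; junk `acc` where Python raises)
def aLoop (l : List Char) (offset acc : Int) (fuel : Nat) : Int :=
  match fuel with
  | 0 => acc
  | fuel + 1 =>
    if offset < (l.length : Int) then
      match PySem.List.pyGet? l offset with
      | none => acc  -- IndexError (offset < -len): unreachable under Pre_
      | some c =>
        if c = '(' then
          match aScan l [] (offset + 1) (l.length + 1) with
          | none => acc  -- IndexError: no ')' before the end
          | some (marker, close) =>
            let parts := PySem.Chars.splitOn marker ['x']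
            match PySem.List.pyGet? parts 0 with
            | none => acc  -- IndexError on parts[0] (impossible: split is nonempty)
            | some p0 =>
              match PySem.List.pyGet? parts 1 with
              | none => acc  -- IndexError on parts[1]: no 'x' in marker
              | some p1 =>
                match PySem.Int.ofChars? p0, PySem.Int.ofChars? p1 with
                | some chars, some rep => aLoop l (close + 1 + chars) (acc + chars * rep) fuel
                | _, _ => acc  -- ValueError from int()
        else aLoop l (offset + 1) (acc + 1) fuel
    else acc

def decompress_len1 (s : String) : Int := aLoop s.toList 0 0 (s.toList.length + 1)

-- ===== PORT B =====
-- one iteration per marker or per literal span; fuel = len s + 1 suffices on the precondition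
def bLoop (l : List Char) (offset acc : Int) (fuel : Nat) : Int :=
  match fuel with
  | 0 => acc
  | fuel + 1 =>
    if offset < (l.length : Int) then
      if PySem.List.pyGet? l offset = some '(' then
        let close := PySem.Chars.findFrom l [')'] (offset + 1) none  -- s.index(")", offset+1)
        if close = -1 then acc  -- ValueError: no ')' before the end
        else
          let parts := PySem.Chars.splitOn (PySem.List.slice l (some (offset + 1)) (some close)) ['x']
          match PySem.List.pyGet? parts 0 with
          | none => acc
          | some p0 =>
            match PySem.List.pyGet? parts 1 with
            | none => acc  -- IndexError on parts[1]: no 'x' in marker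
            | some p1 =>
              match PySem.Int.ofChars? p0, PySem.Int.ofChars? p1 with
              | some chars, some rep => bLoop l (close + 1 + chars) (acc + chars * rep) fuel
              | _, _ => acc  -- ValueError from int()
      else
        let nxt := PySem.Chars.findFrom l ['('] offset none  -- s.find("(", offset)
        let nxt := if nxt = -1 then (l.length : Int) else nxt
        bLoop l nxt (acc + (nxt - offset)) fuel
    else acc

def decompress_len1_alt (s : String) : Int := bLoop s.toList 0 0 (s.toList.length + 1)

-- ===== PRECONDITION & SPEC =====
-- first index ≥ i holding character c (helper for the well-formedness grammar below)
def findCh (l : List Char) (c : Char) (i : Nat) : Option Nat :=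
  ((l.drop i).findIdx? (fun x => x = c)).map (fun k => i + k)

-- the suffix of l starting at i is a well-formed stream of literals and markers "(AxB…)" whose
-- length field A is a nonnegative Python int; exactly where A terminates normally, except that
-- markers with a NEGATIVE length field are also excluded: there the scan moves backwards and
-- A (and B) can re-read input or diverge, e.g. "(-6x1)a" makes A loop forever.
-- the suffix of l starting at i is a well-formed stream of literals and markers "(AxB…)" whose
-- length field A is a nonnegative Python int; exactly where A terminates normally, except that
-- markers with a NEGATIVE length field are also excluded: there the scan moves backwards and
-- A (and B) can re-read input or diverge, e.g. "(-6x1)a" makes A loop forever.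
-- (gas = l.length - i is the recursion measure, made a structural argument so `decide` computes)
def wfAux (l : List Char) (gas : Nat) (i : Nat) : Bool :=
  match gas with
  | 0 => true
  | gas + 1 =>
    if h : i < l.length then
      if l[i] = '(' then
        match findCh l ')' (i + 1) with
        | none => false
        | some j =>
          let parts := PySem.Chars.splitOn ((l.drop (i + 1)).take (j - (i + 1))) ['x']
          match PySem.List.pyGet? parts 0 with
          | none => false
          | some p0 =>
            match PySem.List.pyGet? parts 1 with
            | none => false
            | some p1 =>
              match PySem.Int.ofChars? p0, PySem.Int.ofChars? p1 with
              | some chars, some _ => 0 ≤ chars && wfAux l gas (j + 1 + chars.toNat)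
              | _, _ => false
      else wfAux l gas (i + 1)
    else true

def wfFrom (l : List Char) (i : Nat) : Bool := wfAux l (l.length - i) i

def Pre_decompress_len1 (s : String) : Prop := wfFrom s.toList 0 = true
instance (s : String) : Decidable (Pre_decompress_len1 s) := by unfold Pre_decompress_len1; infer_instance

def pvWitness_decompress_len1 : String := "x(3x2)abcde(2x10)fg"

def Spec_decompress_len1 (s : String) (out : Int) : Prop := out = decompress_len1_alt s
instance (s : String) (out : Int) : Decidable (Spec_decompress_len1 s out) := by unfold Spec_decompress_len1; infer_instance

-- ===== CLAIM (what is proved, stated in full; the proofs are below) =====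
def Claim_equal_decompress_len1 : Prop := ∀ (s : String), Dom_decompress_len1 s → Pre_decompress_len1 s → Spec_decompress_len1 s (decompress_len1 s)

-- ===== LEMMAS AND PROOFS =====

theorem findCh_eq (l : List Char) (c : Char) (i : Nat) :
    findCh l c i = if h : i < l.length then (if l[i] = c then some i else findCh l c (i + 1)) else none := by
  by_cases hil : i < l.length
  · rw [dif_pos hil]
    unfold findCh
    rw [List.drop_eq_getElem_cons hil, List.findIdx?_cons]
    by_cases hc : l[i] = c
    · simp [hc]
    · simp only [hc, decide_false, Bool.false_eq_true, if_false, Option.map_map]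
      congr 1
      funext k
      simp [Function.comp]
      omega
  · rw [dif_neg hil]
    unfold findCh
    rw [List.drop_eq_nil_iff.mpr (by omega)]
    simp

theorem findCh_le_of_eq_some (l : List Char) (c : Char) (i j : Nat) (h : findCh l c i = some j) :
    i ≤ j ∧ j < l.length := by
  have H : ∀ d i j, l.length - i ≤ d → findCh l c i = some j → i ≤ j ∧ j < l.length := by
    intro d
    induction d with
    | zero =>
      intro i j hd h
      rw [findCh_eq, dif_neg (by omega)] at h
      simp at h
    | succ d ih =>
      intro i j hd h
      rw [findCh_eq] at h
      by_cases hil : i < l.length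
      · rw [dif_pos hil] at h
        by_cases hc : l[i] = c
        · rw [if_pos hc] at h; simp at h; omega
        · rw [if_neg hc] at h
          have := ih (i+1) j (by omega) h
          omega
      · rw [dif_neg hil] at h; simp at h
  exact H (l.length - i) i j (le_refl _) h

theorem findCh_some_spec (l : List Char) (c : Char) (i j : Nat) (h : findCh l c i = some j) :
    ∃ hj : j < l.length, l[j] = c ∧ ∀ k, i ≤ k → k < j → ∀ hk : k < l.length, l[k] ≠ c := by
  have H : ∀ d i, l.length - i ≤ d → findCh l c i = some j →
      ∃ hj : j < l.length, l[j] = c ∧ ∀ k, i ≤ k → k < j → ∀ hk : k < l.length, l[k] ≠ c := by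
    intro d
    induction d with
    | zero =>
      intro i hd h
      rw [findCh_eq, dif_neg (by omega)] at h
      simp at h
    | succ d ih =>
      intro i hd h
      rw [findCh_eq] at h
      by_cases hil : i < l.length
      · rw [dif_pos hil] at h
        by_cases hc : l[i] = c
        · rw [if_pos hc] at h
          simp only [Option.some.injEq] at h
          subst h
          exact ⟨hil, hc, fun k hk1 hk2 _ => by omega⟩
        · rw [if_neg hc] at h
          obtain ⟨hjl, hjc, hmin⟩ := ih (i+1) (by omega) h
          refine ⟨hjl, hjc, fun k hk1 hk2 hk => ?_⟩
          rcases Nat.eq_or_lt_of_le hk1 with rfl | hlt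
          · exact hc
          · exact hmin k hlt hk2 hk
      · rw [dif_neg hil] at h; simp at h
  exact H (l.length - i) i (le_refl _) h

theorem findCh_none_spec (l : List Char) (c : Char) (i : Nat) (h : findCh l c i = none) :
    ∀ k, i ≤ k → ∀ hk : k < l.length, l[k] ≠ c := by
  have H : ∀ d i, l.length - i ≤ d → findCh l c i = none →
      ∀ k, i ≤ k → ∀ hk : k < l.length, l[k] ≠ c := by
    intro d
    induction d with
    | zero =>
      intro i hd h k hk1 hk
      omega
    | succ d ih =>
      intro i hd h k hk1 hk hkc
      rw [findCh_eq] at h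
      by_cases hil : i < l.length
      · rw [dif_pos hil] at h
        by_cases hc : l[i] = c
        · rw [if_pos hc] at h; simp at h
        · rw [if_neg hc] at h
          rcases Nat.eq_or_lt_of_le hk1 with rfl | hlt
          · exact hc hkc
          · exact ih (i+1) (by omega) h k hlt hk hkc
      · omega
  exact H (l.length - i) i (le_refl _) h

theorem wfAux_congr (l : List Char) : ∀ g g' i, l.length - i ≤ g → l.length - i ≤ g' →
    wfAux l g i = wfAux l g' i := by
  intro g
  induction g with
  | zero =>
    intro g' i h1 h2
    have hil : ¬ i < l.length := by omega
    cases g' with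
    | zero => rfl
    | succ g' => rw [wfAux, wfAux, dif_neg hil]
  | succ g ihg =>
    intro g' i h1 h2
    cases g' with
    | zero =>
      have hil : ¬ i < l.length := by omega
      rw [wfAux, wfAux, dif_neg hil]
    | succ g' =>
      by_cases hil : i < l.length
      case neg => rw [wfAux, wfAux, dif_neg hil, dif_neg hil]
      case pos =>
      rw [wfAux, wfAux, dif_pos hil, dif_pos hil]
      by_cases hpar : l[i] = '('
      case neg =>
        rw [if_neg hpar, if_neg hpar]
        exact ihg g' (i+1) (by omega) (by omega)
      case pos =>
      rw [if_pos hpar, if_pos hpar]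
      cases hfind : findCh l ')' (i+1) with
      | none => simp
      | some j =>
        have hle := findCh_le_of_eq_some l ')' (i+1) j hfind
        simp only []
        cases hp0 : PySem.List.pyGet? (PySem.Chars.splitOn ((l.drop (i + 1)).take (j - (i + 1))) ['x']) 0 with
        | none => simp
        | some p0 =>
        cases hp1 : PySem.List.pyGet? (PySem.Chars.splitOn ((l.drop (i + 1)).take (j - (i + 1))) ['x']) 1 with
        | none => simp
        | some p1 =>
        cases hc0 : PySem.Int.ofChars? p0 with
        | none => simp [hc0]
        | some chars =>
        cases hc1 : PySem.Int.ofChars? p1 with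
        | none => simp [hc0, hc1]
        | some rep =>
        simp only [hc0, hc1]
        rw [ihg g' (j + 1 + chars.toNat) (by omega) (by omega)]

theorem wfFrom_eq (l : List Char) (i : Nat) :
    wfFrom l i =
      if h : i < l.length then
        if l[i] = '(' then
          match findCh l ')' (i + 1) with
          | none => false
          | some j =>
            let parts := PySem.Chars.splitOn ((l.drop (i + 1)).take (j - (i + 1))) ['x']
            match PySem.List.pyGet? parts 0 with
            | none => false
            | some p0 =>
              match PySem.List.pyGet? parts 1 with
              | none => false
              | some p1 =>
                match PySem.Int.ofChars? p0, PySem.Int.ofChars? p1 with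
                | some chars, some _ => 0 ≤ chars && wfFrom l (j + 1 + chars.toNat)
                | _, _ => false
        else wfFrom l (i + 1)
      else true := by
  by_cases hil : i < l.length
  · rw [dif_pos hil]
    unfold wfFrom
    obtain ⟨d, hd⟩ : ∃ d, l.length - i = d + 1 := ⟨l.length - i - 1, by omega⟩
    rw [hd, wfAux, dif_pos hil]
    by_cases hpar : l[i] = '('
    case neg =>
      rw [if_neg hpar, if_neg hpar]
      exact wfAux_congr l d (l.length - (i+1)) (i+1) (by omega) (le_refl _)
    case pos =>
    rw [if_pos hpar, if_pos hpar]
    cases hfind : findCh l ')' (i+1) with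
    | none => simp
    | some j =>
      have hle := findCh_le_of_eq_some l ')' (i+1) j hfind
      simp only []
      cases hp0 : PySem.List.pyGet? (PySem.Chars.splitOn ((l.drop (i + 1)).take (j - (i + 1))) ['x']) 0 with
      | none => simp
      | some p0 =>
      cases hp1 : PySem.List.pyGet? (PySem.Chars.splitOn ((l.drop (i + 1)).take (j - (i + 1))) ['x']) 1 with
      | none => simp
      | some p1 =>
      cases hc0 : PySem.Int.ofChars? p0 with
      | none => simp [hc0]
      | some chars =>
      cases hc1 : PySem.Int.ofChars? p1 with
      | none => simp [hc0, hc1]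
      | some rep =>
      simp only [hc0, hc1]
      rw [wfAux_congr l d (l.length - (j + 1 + chars.toNat)) (j + 1 + chars.toNat) (by omega) (le_refl _)]
  · rw [dif_neg hil]
    unfold wfFrom
    rw [show l.length - i = 0 by omega]
    rfl




theorem aScan_eq (l : List Char) (j : Nat) : ∀ i : Nat, findCh l ')' i = some j →
    ∀ (m : List Char) (fuel : Nat), j + 1 - i ≤ fuel →
      aScan l m (i : Int) fuel = some (m ++ (l.drop i).take (j - i), (j : Int)) := by
  intro i hj m fuel
  induction fuel generalizing i m with
  | zero =>
    intro hf
    have := findCh_le_of_eq_some l ')' i j hj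
    omega
  | succ fuel ih =>
    intro hf
    have hle := findCh_le_of_eq_some l ')' i j hj
    obtain ⟨hjl, hc, hmin⟩ := findCh_some_spec l ')' i j hj
    have hil : i < l.length := by omega
    rw [aScan]
    rw [PySem.List.pyGet?_natCast, List.getElem?_eq_getElem hil]
    rcases Nat.eq_or_lt_of_le hle.1 with rfl | hlt
    · simp [hc]
    · have hne : l[i] ≠ ')' := hmin i (le_refl _) hlt hil
      simp only [if_neg hne]
      rw [findCh_eq] at hj
      rw [dif_pos hil, if_neg hne] at hj
      have : ((i : Int) + 1) = ((i + 1 : Nat) : Int) := by push_cast; ring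
      rw [this, ih (i+1) hj (m ++ [l[i]]) (by omega)]
      congr 1
      have hdrop : l.drop i = l[i] :: l.drop (i+1) := List.drop_eq_getElem_cons hil
      rw [hdrop]
      have : j - i = (j - (i+1)) + 1 := by omega
      rw [this, List.take_succ_cons]
      simp

theorem findFrom_of_findCh_some (l : List Char) (c : Char) (i j : Nat) (hi : i ≤ l.length)
    (h : findCh l c i = some j) : PySem.Chars.findFrom l [c] (i : Int) none = (j : Int) := by
  have hle := findCh_le_of_eq_some l c i j h
  obtain ⟨hjl, hc, hmin⟩ := findCh_some_spec l c i j h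
  have hne : PySem.Chars.findFrom l [c] (i : Int) none ≠ -1 := by
    rw [ne_eq, PySem.Chars.findFrom_natCast_eq_neg_one_iff l [c] i hi, List.singleton_infix_iff]
    push Not
    refine List.mem_iff_getElem.mpr ⟨j - i, by rw [List.length_drop]; omega, ?_⟩
    have hj' : i + (j - i) = j := by omega
    simp only [List.getElem_drop, hj']
    exact hc
  obtain ⟨hge, hpre, hminf⟩ := PySem.Chars.findFrom_natCast_spec l [c] i hi hne
  set v := PySem.Chars.findFrom l [c] (i : Int) none with hv
  have hv0 : 0 ≤ v := le_trans (by exact_mod_cast Int.natCast_nonneg i) hge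
  obtain ⟨t, ht⟩ := hpre
  have hvl : v.toNat < l.length := by
    have := congrArg List.length ht
    simp [List.length_drop] at this
    omega
  have hvc : l[v.toNat] = c := by
    have := congrArg (fun xs => xs.head?) ht
    simp [List.head?_drop] at this
    simpa [List.getElem?_eq_getElem hvl] using this.symm
  -- v.toNat = j by double minimality
  have hiv : i ≤ v.toNat := by omega
  have h1 : ¬ v.toNat < j := fun hlt => hmin v.toNat hiv hlt hvl hvc
  have h2 : ¬ j < v.toNat := by
    intro hlt
    apply hminf j (by omega) hlt
    refine ⟨l.drop (j+1), ?_⟩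
    rw [show [c] = [l[j]] from by rw [hc]]
    simp [(List.drop_eq_getElem_cons hjl).symm]
  have : v.toNat = j := by omega
  omega

theorem findFrom_of_findCh_none (l : List Char) (c : Char) (i : Nat) (hi : i ≤ l.length)
    (h : findCh l c i = none) : PySem.Chars.findFrom l [c] (i : Int) none = -1 := by
  rw [PySem.Chars.findFrom_natCast_eq_neg_one_iff l [c] i hi, List.singleton_infix_iff]
  intro hmem
  obtain ⟨k, hk, hval⟩ := List.mem_iff_getElem.mp hmem
  rw [List.getElem_drop] at hval
  exact findCh_none_spec l c i h (i + k) (by omega) (by rw [List.length_drop] at hk; omega) hval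

theorem aLoop_span (l : List Char) (m : Nat) : ∀ (d o : Nat) (acc : Int) (fuel : Nat), m = o + d →
    (∀ k, o ≤ k → k < m → ∀ hk : k < l.length, l[k] ≠ '(') →
    m ≤ l.length → d ≤ fuel →
    aLoop l (o : Int) acc fuel = aLoop l (m : Int) (acc + (d : Int)) (fuel - d) := by
  intro d
  induction d with
  | zero => intro o acc fuel h1 _ _ _; simp [h1]
  | succ d ih =>
    intro o acc fuel h1 hlit hml hfuel
    have hol : o < l.length := by omega
    obtain ⟨f, rfl⟩ : ∃ f, fuel = f + 1 := ⟨fuel - 1, by omega⟩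
    rw [aLoop]
    rw [if_pos (by exact_mod_cast hol)]
    rw [PySem.List.pyGet?_natCast, List.getElem?_eq_getElem hol]
    simp only [if_neg (hlit o (le_refl _) (by omega) hol)]
    rw [show ((o : Int) + 1) = ((o + 1 : Nat) : Int) by push_cast; ring]
    rw [ih (o+1) (acc+1) f (by omega) (fun k hk1 hk2 hk => hlit k (by omega) hk2 hk) hml (by omega)]
    congr 1
    · push_cast; ring
    · omega

theorem wfFrom_span (l : List Char) (m : Nat) : ∀ (d o : Nat), m = o + d →
    (∀ k, o ≤ k → k < m → ∀ hk : k < l.length, l[k] ≠ '(') →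
    m ≤ l.length → wfFrom l o = wfFrom l m := by
  intro d
  induction d with
  | zero => intro o h1 _ _; simp [h1]
  | succ d ih =>
    intro o h1 hlit hml
    have hol : o < l.length := by omega
    rw [wfFrom_eq]
    rw [dif_pos hol, if_neg (hlit o (le_refl _) (by omega) hol)]
    exact ih (o+1) (by omega) (fun k hk1 hk2 hk => hlit k (by omega) hk2 hk) hml

theorem key (l : List Char) (N : Nat) :
    ∀ o : Nat, ∀ acc : Int, ∀ fa fb : Nat, l.length - o ≤ N → wfFrom l o = true →
      l.length + 1 - o ≤ fa → 1 ≤ fa → l.length + 1 - o ≤ fb → 1 ≤ fb →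
      aLoop l (o : Int) acc fa = bLoop l (o : Int) acc fb := by
  intro o acc fa fb hN hwf hfa hfa1 hfb hfb1
  induction N generalizing o acc fa fb with
  | zero =>
    obtain ⟨f, rfl⟩ : ∃ f, fa = f + 1 := ⟨fa - 1, by omega⟩
    obtain ⟨g, rfl⟩ : ∃ g, fb = g + 1 := ⟨fb - 1, by omega⟩
    have hol : ¬ ((o : Int) < (l.length : Int)) := by exact_mod_cast Nat.not_lt.mpr (by omega)
    rw [aLoop, bLoop, if_neg hol, if_neg hol]
  | succ N ih =>
    obtain ⟨f, rfl⟩ : ∃ f, fa = f + 1 := ⟨fa - 1, by omega⟩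
    obtain ⟨g, rfl⟩ : ∃ g, fb = g + 1 := ⟨fb - 1, by omega⟩
    by_cases hol : o < l.length
    case neg =>
      have hol' : ¬ ((o : Int) < (l.length : Int)) := by exact_mod_cast hol
      rw [aLoop, bLoop, if_neg hol', if_neg hol']
    case pos =>
    have hol' : ((o : Int) < (l.length : Int)) := by exact_mod_cast hol
    rw [aLoop, bLoop, if_pos hol', if_pos hol']
    simp only [PySem.List.pyGet?_natCast, List.getElem?_eq_getElem hol]
    by_cases hpar : l[o] = '('
    case pos =>
      -- marker case
      rw [wfFrom_eq] at hwf
      rw [dif_pos hol, if_pos hpar] at hwf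
      rw [if_pos (by rw [hpar])]
      simp only [hpar]
      split at hwf
      case h_1 => simp at hwf
      case h_2 j hj =>
      have hle := findCh_le_of_eq_some l ')' (o+1) j hj
      rw [show ((o : Int) + 1) = ((o + 1 : Nat) : Int) by push_cast; ring]
      rw [aScan_eq l j (o+1) hj [] (l.length + 1) (by omega)]
      rw [findFrom_of_findCh_some l ')' (o+1) j (by omega) hj]
      rw [if_neg (by omega : ¬ ((j : Int) = -1))]
      rw [PySem.List.slice_natCast]
      simp only [List.nil_append] at *
      split at hwf
      case h_1 => simp at hwf
      case h_2 p0 hp0 =>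
      split at hwf
      case h_1 => simp at hwf
      case h_2 p1 hp1 =>
      split at hwf
      case h_2 => simp at hwf
      case h_1 chars rep hc0 hc1 =>
      rw [Bool.and_eq_true, decide_eq_true_eq] at hwf
      obtain ⟨hch, hwf'⟩ := hwf
      rw [if_pos trivial]
      have hcast : (j : Int) + 1 + chars = ((j + 1 + chars.toNat : Nat) : Int) := by
        push_cast [Int.toNat_of_nonneg hch]; ring
      rw [hcast]
      exact ih (j + 1 + chars.toNat) (acc + chars * rep) f g (by omega) hwf'
        (by omega) (by omega) (by omega) (by omega)
    case neg =>
      -- literal case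
      rw [if_neg (show ¬ (some l[o] = some '(') by simpa using hpar)]
      rw [if_neg hpar]
      cases hfind : findCh l '(' o with
      | some m =>
        have hle := findCh_le_of_eq_some l '(' o m hfind
        obtain ⟨hml, hmc, hmin⟩ := findCh_some_spec l '(' o m hfind
        have hom : o < m := by
          rcases Nat.eq_or_lt_of_le hle.1 with rfl | h
          · exact absurd hmc hpar
          · exact h
        rw [findFrom_of_findCh_some l '(' o m (by omega) hfind]
        rw [if_neg (by omega : ¬ ((m : Int) = -1))]
        rw [show ((o : Int) + 1) = ((o + 1 : Nat) : Int) by push_cast; ring]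
        rw [aLoop_span l m (m - (o + 1)) (o + 1) (acc + 1) f (by omega)
          (fun k hk1 hk2 hk => hmin k (by omega) hk2 hk) (by omega) (by omega)]
        rw [show acc + 1 + ((m - (o + 1) : Nat) : Int) = acc + ((m : Int) - (o : Int)) by omega]
        have hwfm : wfFrom l m = true := by
          rw [← wfFrom_span l m (m - o) o (by omega) (fun k hk1 hk2 hk => hmin k hk1 hk2 hk) (by omega)]
          exact hwf
        exact ih m (acc + ((m : Int) - (o : Int))) (f - (m - (o + 1))) g (by omega) hwfm
          (by omega) (by omega) (by omega) (by omega)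
      | none =>
        have hlit := findCh_none_spec l '(' o hfind
        rw [findFrom_of_findCh_none l '(' o (by omega) hfind]
        rw [if_pos rfl]
        rw [show ((o : Int) + 1) = ((o + 1 : Nat) : Int) by push_cast; ring]
        rw [aLoop_span l l.length (l.length - (o + 1)) (o + 1) (acc + 1) f (by omega)
          (fun k hk1 hk2 hk => hlit k (by omega) hk) (by omega) (by omega)]
        rw [show acc + 1 + ((l.length - (o + 1) : Nat) : Int) = acc + ((l.length : Int) - (o : Int)) by omega]
        have hwfm : wfFrom l l.length = true := by
          rw [wfFrom_eq]; simp
        exact ih l.length (acc + ((l.length : Int) - (o : Int))) (f - (l.length - (o + 1))) g (by omega) hwfm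
          (by omega) (by omega) (by omega) (by omega)

-- ===== VERDICT (by name: the statement is the Claim_ definition above) =====
theorem decompress_len1_spec : Claim_equal_decompress_len1 := by
  intro s _ hpre
  unfold Spec_decompress_len1 decompress_len1 decompress_len1_alt
  have h0 : ((0 : Nat) : Int) = (0 : Int) := rfl
  rw [← h0]
  exact key s.toList s.toList.length 0 0 _ _ (by omega) hpre (by omega) (by omega) (by omega) (by omega)
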